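-- pv_equiv track=rewrite | github.com/Wenying-Li/DIR_skyfinder | src/data/Start/step2_select_mi_features.py | find_mi_pairs
-- ===== SOURCE A (Python) =====
-- def find_mi_pairs(columns):
--     """
--     找到所有以 M/I 结尾的成对特征。
--     例如：
--       PressureM / PressureI -> base = Pressure
--       TempM / TempI -> base = Temp
--     返回:
--       pairs = {base_name: {"M": col_m, "I": col_i}}
--     """
--     pairs = {}
--
--     col_set = set(columns)
--     for col in columns:
--         if len(col) < 2:
--             continue
--         suffix = col[-1]
--         if suffix not in {"M", "I"}:
--             continue
--
--         base = col[:-1]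
--         if not base:
--             continue
--
--         m_col = f"{base}M"
--         i_col = f"{base}I"
--
--         if m_col in col_set and i_col in col_set:
--             pairs[base] = {"M": m_col, "I": i_col}
--
--     return pairs
-- ===== SOURCE B (Python) =====
-- def find_mi_pairs(columns):
--     # Pass 1: index each candidate base by the set of M/I suffixes seen for it.
--     groups = {}
--     for col in columns:
--         if len(col) >= 2 and col[-1] in ("M", "I") and col[:-1]:
--             groups.setdefault(col[:-1], set()).add(col[-1])
--     # Pass 2: keep the bases that have both suffixes.
--     pairs = {}
--     for base, sufs in groups.items():
--         if "M" in sufs and "I" in sufs: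
--             pairs[base] = {"M": base + "M", "I": base + "I"}
--     return pairs
-- ===== Notes on version B (the rewrite author's own statement) =====
-- stated objective: alternative
-- what changed: A's single scan reconstructs baseM/baseI for every column and probes a set of all columns; B instead first builds an index dict from base to the set of M/I suffixes actually seen, then a second pass keeps the bases whose suffix set contains both, so the per-column membership probe into the full column set disappears.
import Mathlib
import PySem

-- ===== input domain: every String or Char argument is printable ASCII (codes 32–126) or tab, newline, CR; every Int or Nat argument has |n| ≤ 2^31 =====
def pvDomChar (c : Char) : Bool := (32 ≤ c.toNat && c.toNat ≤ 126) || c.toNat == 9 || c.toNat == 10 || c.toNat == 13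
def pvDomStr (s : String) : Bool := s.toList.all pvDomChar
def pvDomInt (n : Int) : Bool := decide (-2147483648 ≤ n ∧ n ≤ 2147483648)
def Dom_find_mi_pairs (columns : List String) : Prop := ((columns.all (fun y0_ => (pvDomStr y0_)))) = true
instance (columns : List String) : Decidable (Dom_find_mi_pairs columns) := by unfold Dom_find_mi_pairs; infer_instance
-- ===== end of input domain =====

-- B replaces A's single reconstruct-and-probe scan by a group-then-filter decomposition
-- (pass 1 indexes bases by their seen M/I suffixes, pass 2 keeps complete bases);
-- similar cost, objective: alternative decomposition.

-- shared string helper: f"{base}M" / base + "M" (string concatenation with one char)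
def pvPush (s : String) (c : Char) : String := String.ofList (s.toList ++ [c])

-- ===== PORT A =====
-- loop body of A's 'for col in columns'
def pvStepA (colSet : PySem.Set String) (pairs : PySem.Dict String (List (String × String)))
    (col : String) : PySem.Dict String (List (String × String)) :=
  if PySem.Str.len col < 2 then pairs
  else
    -- col[-1]: always 'some' here since len(col) ≥ 2
    (PySem.Str.pyGet? col (-1)).elim pairs (fun suffix =>
      if ¬ (suffix = 'M' ∨ suffix = 'I') then pairs
      else
        let base := PySem.Str.slice col none (some (-1))
        if base = "" then pairs
        else
          let m_col := pvPush base 'M'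
          let i_col := pvPush base 'I'
          if PySem.Set.contains colSet m_col && PySem.Set.contains colSet i_col then
            PySem.Dict.insert pairs base [("M", m_col), ("I", i_col)]
          else pairs)

def find_mi_pairs (columns : List String) : List (String × List (String × String)) :=
  let col_set : PySem.Set String := PySem.Set.ofList columns
  (columns.foldl (pvStepA col_set) PySem.Dict.empty).items

-- ===== PORT B =====
-- pass-1 loop body: groups.setdefault(col[:-1], set()).add(col[-1]) under the guard
def pvStepB (g : PySem.Dict String (PySem.Set Char)) (col : String) :
    PySem.Dict String (PySem.Set Char) :=
  if 2 ≤ PySem.Str.len col then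
    (PySem.Str.pyGet? col (-1)).elim g (fun suf =>
      if (suf = 'M' ∨ suf = 'I') ∧ PySem.Str.slice col none (some (-1)) ≠ "" then
        PySem.Dict.modify g (PySem.Str.slice col none (some (-1))) PySem.Set.empty
          (fun s => PySem.Set.add s suf)
      else g)
  else g

def find_mi_pairs_alt (columns : List String) : List (String × List (String × String)) :=
  let groups : PySem.Dict String (PySem.Set Char) := columns.foldl pvStepB PySem.Dict.empty
  ((PySem.Dict.items groups).filter
      (fun bs => PySem.Set.contains bs.2 'M' && PySem.Set.contains bs.2 'I')).map
    (fun bs => (bs.1, [("M", pvPush bs.1 'M'), ("I", pvPush bs.1 'I')]))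

-- ===== PRECONDITION & SPEC =====
def Spec_find_mi_pairs (columns : List String) (out : List (String × List (String × String))) : Prop := out = find_mi_pairs_alt columns
instance (columns : List String) (out : List (String × List (String × String))) : Decidable (Spec_find_mi_pairs columns out) := by unfold Spec_find_mi_pairs; infer_instance

-- ===== CLAIM (what is proved, stated in full; the proofs are below) =====
def Claim_equal_find_mi_pairs : Prop := ∀ (columns : List String), Dom_find_mi_pairs columns → Spec_find_mi_pairs columns (find_mi_pairs columns)

-- ===== LEMMAS AND PROOFS =====

-- A's completeness test on a base (exactly A's 'm_col in col_set and i_col in col_set')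
def pvP (cs : List String) (b : String) : Bool :=
  PySem.Set.contains (PySem.Set.ofList cs) (pvPush b 'M') &&
  PySem.Set.contains (PySem.Set.ofList cs) (pvPush b 'I')

-- the entry built for a complete base
def pvF (b : String) : String × List (String × String) :=
  (b, [("M", pvPush b 'M'), ("I", pvPush b 'I')])

-- loop invariant: A's dict is the complete-base filter-map image of B's groups dict,
-- groups keys are nonempty and unique, and a suffix set records exactly the M/I columns seen
def pvInv (cs done : List String) (d : PySem.Dict String (List (String × String)))
    (g : PySem.Dict String (PySem.Set Char)) : Prop :=
  d.items = (g.items.filter (fun bs => pvP cs bs.1)).map (fun bs => pvF bs.1) ∧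
  g.keys.Nodup ∧
  (∀ b ∈ g.keys, b ≠ "") ∧
  (∀ (b : String) (c : Char),
    c ∈ PySem.Dict.getD g b PySem.Set.empty ↔
      ((c = 'M' ∨ c = 'I') ∧ pvPush b c ∈ done ∧ b ≠ ""))

lemma pvPush_toList (s : String) (c : Char) : (pvPush s c).toList = s.toList ++ [c] := by
  simp [pvPush]

lemma pvPush_inj {b b' : String} {c c' : Char} (h : pvPush b c = pvPush b' c') :
    b = b' ∧ c = c' := by
  have h2 : b.toList ++ [c] = b'.toList ++ [c'] := by
    rw [← pvPush_toList, ← pvPush_toList, h]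
  have hb : b.toList = b'.toList := by
    have := congrArg List.dropLast h2
    simpa [List.dropLast_concat] using this
  refine ⟨String.toList_inj.mp hb, ?_⟩
  rw [hb] at h2
  have := List.append_cancel_left h2
  simpa using this

lemma pvPush_len {b : String} (hb : b ≠ "") (c : Char) : 2 ≤ (pvPush b c).toList.length := by
  rw [pvPush_toList]
  have : b.toList ≠ [] := by
    intro e
    exact hb (String.toList_inj.mp (by simpa using e))
  cases hl : b.toList with
  | nil => exact absurd hl this
  | cons x xs => simp

-- part (1) of the invariant through one qualifying column with base 'base'
lemma pvInv1_step (cs : List String) (d : PySem.Dict String (List (String × String)))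
    (g : PySem.Dict String (PySem.Set Char)) (base : String) (ns : PySem.Set Char)
    (h1 : d.items = (g.items.filter (fun bs => pvP cs bs.1)).map (fun bs => pvF bs.1)) :
    (if pvP cs base then PySem.Dict.insert d base [("M", pvPush base 'M'), ("I", pvPush base 'I')] else d).items
      = ((PySem.Dict.insert g base ns).items.filter (fun bs => pvP cs bs.1)).map (fun bs => pvF bs.1) := by
  have hfix : ∀ p ∈ d.items, p = pvF p.1 := by
    rw [h1]
    intro p hp
    obtain ⟨q, _, rfl⟩ := List.mem_map.mp hp
    rfl
  have hsub : ∀ k, k ∈ d.keys → k ∈ g.keys := by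
    intro k hk
    simp only [PySem.Dict.keys] at hk ⊢
    rw [h1] at hk
    obtain ⟨p, hp, hpk⟩ := List.mem_map.mp hk
    obtain ⟨q, hq, rfl⟩ := List.mem_map.mp hp
    have hq' := List.mem_filter.mp hq
    exact List.mem_map.mpr ⟨q, hq'.1, by simpa [pvF] using hpk⟩
  by_cases hc : PySem.Dict.contains g base = true
  · rw [PySem.Dict.items_insert_of_contains g ns hc, List.filter_map, List.map_map]
    have hr1 : ((fun bs => pvP cs bs.1) ∘ fun p => if (p.1 == base) = true then (base, ns) else p)
        = fun p : String × PySem.Set Char => pvP cs p.1 := by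
      funext p
      by_cases hpb : (p.1 == base) = true
      · simp [Function.comp, eq_of_beq hpb]
      · simp [Function.comp, hpb]
    have hr2 : ((fun bs : String × PySem.Set Char => pvF bs.1) ∘ fun p => if (p.1 == base) = true then (base, ns) else p)
        = fun p : String × PySem.Set Char => pvF p.1 := by
      funext p
      by_cases hpb : (p.1 == base) = true
      · simp [Function.comp, eq_of_beq hpb]
      · simp [Function.comp, hpb]
    rw [hr1, hr2, ← h1]
    by_cases hP : pvP cs base = true
    · rw [if_pos hP]
      have hbk : base ∈ g.keys := (PySem.Dict.contains_iff_mem_keys g base).mp hc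
      obtain ⟨p, hp, hpk⟩ := List.mem_map.mp (by simpa only [PySem.Dict.keys] using hbk)
      have hmem : pvF base ∈ d.items := by
        rw [h1]
        refine List.mem_map.mpr ⟨p, List.mem_filter.mpr ⟨hp, by rw [hpk]; exact hP⟩, by rw [hpk]⟩
      have hdc : PySem.Dict.contains d base = true := by
        rw [PySem.Dict.contains_iff_mem_keys]
        simp only [PySem.Dict.keys]
        exact List.mem_map.mpr ⟨pvF base, hmem, rfl⟩
      rw [PySem.Dict.items_insert_of_contains d _ hdc]
      have : ∀ p ∈ d.items,
          (if (p.1 == base) = true then (base, [("M", pvPush base 'M'), ("I", pvPush base 'I')]) else p) = p := by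
        intro p hp
        by_cases hpb : (p.1 == base) = true
        · rw [if_pos hpb, hfix p hp, eq_of_beq hpb]
          rfl
        · rw [if_neg hpb]
      rw [List.map_congr_left this]
      simp
    · rw [if_neg hP]
  · rw [PySem.Dict.items_insert_of_not_contains g ns (by simpa using hc), List.filter_append,
      List.map_append, ← h1]
    by_cases hP : pvP cs base = true
    · rw [if_pos hP]
      have hdc : PySem.Dict.contains d base = false := by
        have : base ∉ g.keys := fun hk => absurd ((PySem.Dict.contains_iff_mem_keys g base).mpr hk) (by simpa using hc)
        have hnd : base ∉ d.keys := fun hk => this (hsub base hk)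
        cases hdcv : PySem.Dict.contains d base with
        | false => rfl
        | true => exact absurd ((PySem.Dict.contains_iff_mem_keys d base).mp hdcv) hnd
      rw [PySem.Dict.items_insert_of_not_contains d _ hdc]
      simp [hP, pvF]
    · rw [if_neg hP]
      simp [hP]

-- the invariant is preserved by one loop step of each pass
lemma pvStep_inv (cs done : List String) (col : String)
    (d : PySem.Dict String (List (String × String))) (g : PySem.Dict String (PySem.Set Char))
    (h : pvInv cs done d g) :
    pvInv cs (done ++ [col]) (pvStepA (PySem.Set.ofList cs) d col) (pvStepB g col) := by
  obtain ⟨h1, h2, h3, h4⟩ := h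
  have hlen : PySem.Str.len col = (col.toList.length : Int) := PySem.Str.len_eq col
  by_cases hshort : PySem.Str.len col < 2
  · -- both loop bodies skip this column
    have hA : pvStepA (PySem.Set.ofList cs) d col = d := by
      unfold pvStepA
      rw [if_pos hshort]
    have hB : pvStepB g col = g := by
      unfold pvStepB
      rw [if_neg (not_le.mpr hshort)]
    rw [hA, hB]
    refine ⟨h1, h2, h3, ?_⟩
    intro b c
    rw [h4 b c]
    have hne : ∀ (b' : String) (c' : Char), b' ≠ "" → pvPush b' c' ≠ col := by
      intro b' c' hb' he
      have := pvPush_len hb' c'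
      rw [he] at this
      omega
    constructor
    · rintro ⟨hmi, hd, hb⟩
      exact ⟨hmi, List.mem_append.mpr (Or.inl hd), hb⟩
    · rintro ⟨hmi, hd, hb⟩
      rcases List.mem_append.mp hd with hd | hd
      · exact ⟨hmi, hd, hb⟩
      · exact absurd (List.mem_singleton.mp hd) (hne b c hb)
  · -- len(col) ≥ 2
    have hlen2 : 2 ≤ col.toList.length := by omega
    have hnil : col.toList ≠ [] := by
      intro e; rw [e] at hlen2; simp at hlen2
    have hget : PySem.Str.pyGet? col (-1) = some (col.toList.getLast hnil) := by
      simp only [PySem.Str.pyGet?_eq, PySem.Chars.pyGet?_eq_listPyGet?, PySem.List.pyGet?_neg_one]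
      exact List.getLast?_eq_some_getLast hnil
    set lc := col.toList.getLast hnil with hlc
    set base := PySem.Str.slice col none (some (-1)) with hbase
    have hbl : base.toList = col.toList.dropLast := PySem.Str.slice_to_neg_one col
    have hbne : base ≠ "" := by
      intro e
      have : base.toList = [] := by rw [e]; rfl
      rw [hbl] at this
      have hlength : col.toList.length - 1 = 0 := by
        simpa [List.length_dropLast] using congrArg List.length this
      omega
    have hcol : pvPush base lc = col := by
      apply String.toList_inj.mp
      rw [pvPush_toList, hbl]
      exact List.dropLast_append_getLast hnil
    by_cases hmi : lc = 'M' ∨ lc = 'I'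
    · -- qualifying column: A probes completeness, B records the suffix
      have hA : pvStepA (PySem.Set.ofList cs) d col
          = if pvP cs base then PySem.Dict.insert d base [("M", pvPush base 'M'), ("I", pvPush base 'I')] else d := by
        unfold pvStepA
        rw [if_neg hshort, hget]
        simp only [Option.elim_some]
        rw [if_neg (not_not_intro hmi), if_neg hbne]
        rfl
      have hB : pvStepB g col
          = PySem.Dict.insert g base (PySem.Set.add (PySem.Dict.getD g base PySem.Set.empty) lc) := by
        unfold pvStepB
        rw [if_pos (not_lt.mp hshort), hget]
        simp only [Option.elim_some]
        rw [if_pos ⟨hmi, by rw [← hbase]; exact hbne⟩]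
        rfl
      rw [hA, hB]
      refine ⟨pvInv1_step cs d g base _ h1, PySem.Dict.nodup_keys_insert _ _ _ h2, ?_, ?_⟩
      · intro b hb
        rcases (PySem.Dict.mem_keys_insert g base b _).mp hb with rfl | hb
        · exact hbne
        · exact h3 b hb
      · intro b c
        rw [PySem.Dict.getD_insert]
        by_cases hbb : b = base
        · rw [if_pos hbb, hbb]
          rw [PySem.Set.mem_add]
          constructor
          · rintro (hc | rfl)
            · obtain ⟨hmi', hd, hb'⟩ := (h4 base c).mp hc
              exact ⟨hmi', List.mem_append.mpr (Or.inl hd), hb'⟩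
            · exact ⟨hmi, List.mem_append.mpr (Or.inr (by rw [hcol]; exact List.mem_singleton.mpr rfl)), hbne⟩
          · rintro ⟨hmi', hd, hb'⟩
            rcases List.mem_append.mp hd with hd | hd
            · exact Or.inl ((h4 base c).mpr ⟨hmi', hd, hb'⟩)
            · have : pvPush base c = pvPush base lc := by
                rw [hcol]; exact List.mem_singleton.mp hd
              exact Or.inr (pvPush_inj this).2
        · rw [if_neg hbb, h4 b c]
          constructor
          · rintro ⟨hmi', hd, hb'⟩
            exact ⟨hmi', List.mem_append.mpr (Or.inl hd), hb'⟩
          · rintro ⟨hmi', hd, hb'⟩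
            rcases List.mem_append.mp hd with hd | hd
            · exact ⟨hmi', hd, hb'⟩
            · have : pvPush b c = pvPush base lc := by
                rw [hcol]; exact List.mem_singleton.mp hd
              exact absurd (pvPush_inj this).1 hbb
    · -- last character is neither 'M' nor 'I': both loop bodies skip
      have hA : pvStepA (PySem.Set.ofList cs) d col = d := by
        unfold pvStepA
        rw [if_neg hshort, hget]
        simp only [Option.elim_some]
        rw [if_pos (by simpa using hmi)]
      have hB : pvStepB g col = g := by
        unfold pvStepB
        rw [if_pos (not_lt.mp hshort), hget]
        simp only [Option.elim_some]
        rw [if_neg (by simp [hmi])]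
      rw [hA, hB]
      refine ⟨h1, h2, h3, ?_⟩
      intro b c
      rw [h4 b c]
      constructor
      · rintro ⟨hmi', hd, hb⟩
        exact ⟨hmi', List.mem_append.mpr (Or.inl hd), hb⟩
      · rintro ⟨hmi', hd, hb⟩
        rcases List.mem_append.mp hd with hd | hd
        · exact ⟨hmi', hd, hb⟩
        · have hec : pvPush b c = col := List.mem_singleton.mp hd
          rw [← hcol] at hec
          exact absurd ((pvPush_inj hec).2 ▸ hmi') hmi
  
lemma pvFold_inv (cs : List String) : ∀ (rest done : List String) d g, pvInv cs done d g →
    pvInv cs (done ++ rest) (rest.foldl (pvStepA (PySem.Set.ofList cs)) d) (rest.foldl pvStepB g) := by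
  intro rest
  induction rest with
  | nil => intro done d g h; simpa using h
  | cons col rest ih =>
      intro done d g h
      have h' := pvStep_inv cs done col d g h
      have := ih (done ++ [col]) _ _ h'
      simpa using this

-- ===== VERDICT (by name: the statement is the Claim_ definition above) =====
theorem find_mi_pairs_spec : Claim_equal_find_mi_pairs := by
  intro columns _
  unfold Spec_find_mi_pairs find_mi_pairs find_mi_pairs_alt
  have hbase : pvInv columns [] PySem.Dict.empty PySem.Dict.empty := by
    refine ⟨rfl, by simp [PySem.Dict.keys, PySem.Dict.empty], by simp [PySem.Dict.keys, PySem.Dict.empty], ?_⟩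
    intro b c
    constructor
    · intro hc
      rw [PySem.Dict.getD_empty] at hc
      simp [PySem.Set.empty] at hc
    · rintro ⟨_, hd, _⟩; exact absurd hd (by simp)
  obtain ⟨h1, h2, h3, h4⟩ := by
    have := pvFold_inv columns columns [] PySem.Dict.empty PySem.Dict.empty hbase
    simpa using this
  rw [h1]
  set g := columns.foldl pvStepB PySem.Dict.empty with hg
  have hPQ : ∀ p ∈ g.items,
      pvP columns p.1 = (PySem.Set.contains p.2 'M' && PySem.Set.contains p.2 'I') := by
    intro p hp
    have hpne : p.1 ≠ "" := h3 p.1 (PySem.Dict.mem_keys_of_mem_items g hp)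
    have hgd : PySem.Dict.getD g p.1 PySem.Set.empty = p.2 := by
      obtain ⟨k, v⟩ := p
      exact PySem.Dict.getD_of_mem_items g hp h2 _
    apply Bool.coe_iff_coe.mp
    simp only [pvP, Bool.and_eq_true, PySem.Set.contains, List.contains_iff_mem,
      PySem.Set.mem_ofList]
    rw [← hgd, h4 p.1 'M', h4 p.1 'I']
    constructor
    · rintro ⟨hm, hi⟩
      exact ⟨⟨Or.inl rfl, hm, hpne⟩, ⟨Or.inr rfl, hi, hpne⟩⟩
    · rintro ⟨⟨_, hm, _⟩, ⟨_, hi, _⟩⟩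
      exact ⟨hm, hi⟩
  rw [List.filter_congr hPQ]
  simp [pvF]
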